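-- pv_equiv track=rewrite | github.com/ulli85/advent-of-code | 2-1.py | is_safe_decremental
-- ===== SOURCE A (Python) =====
-- def is_safe_decremental(row:list, max_errors) -> bool:
--     for i in range(1, len(row)):
--         if row[i-1] > row[i] and (row[i-1] - row[i]) <= 3:
--             continue
--         else:
--             if max_errors > 0:
--                 row_new1 = row.copy()
--                 del row_new1[i]
--                 row_new2 = row.copy()
--                 del row_new2[i-1]
--                 return is_safe_decremental(row_new1, max_errors - 1) or is_safe_decremental(row_new2, max_errors - 1)
--             return False
--     return True
-- ===== SOURCE B (Python) =====
-- def is_safe_decremental(row: list, max_errors) -> bool: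
--     # Explicit DFS work-stack instead of two-way recursion; same Boolean result.
--     stack = [(row, max_errors)]
--     while stack:
--         seq, errors = stack.pop()
--         violation = None
--         i = 1
--         for a, b in zip(seq, seq[1:]):
--             if not (a > b and a - b <= 3):
--                 violation = i
--                 break
--             i += 1
--         if violation is None:
--             return True
--         if errors > 0:
--             stack.append((seq[:violation] + seq[violation + 1:], errors - 1))
--             stack.append((seq[:violation - 1] + seq[violation:], errors - 1))
--     return False
-- ===== Notes on version B (the rewrite author's own statement) =====
-- stated objective: alternative
-- what changed: Replaced A's two-way recursive dampener with an explicit DFS work-stack loop: states (sequence, remaining errors) are pushed and popped, each popped state is scanned for its first violation and, if errors remain, the two reduced sequences are pushed; recursion disappears entirely.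
import Mathlib
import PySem

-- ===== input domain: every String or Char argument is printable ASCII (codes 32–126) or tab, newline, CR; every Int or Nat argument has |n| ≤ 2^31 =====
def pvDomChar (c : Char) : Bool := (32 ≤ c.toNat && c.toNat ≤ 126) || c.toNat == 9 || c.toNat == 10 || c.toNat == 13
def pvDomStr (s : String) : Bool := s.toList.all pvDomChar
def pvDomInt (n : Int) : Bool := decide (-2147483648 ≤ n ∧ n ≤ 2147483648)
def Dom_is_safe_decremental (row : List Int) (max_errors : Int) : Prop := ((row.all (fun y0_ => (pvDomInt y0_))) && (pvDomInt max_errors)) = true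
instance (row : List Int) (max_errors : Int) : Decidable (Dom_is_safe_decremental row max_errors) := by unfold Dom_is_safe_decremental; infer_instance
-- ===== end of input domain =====

-- B replaces A's two-way recursive dampener by an explicit DFS work-stack that branches
-- at the first violation of each popped state; same Boolean result (objective: alternative).

-- ===== PORT A =====
-- A's for-loop over i in range(1, len(row)) with the two recursive calls at the first
-- violation, as one recursion on (row, max_errors, i).
def aGo (row : List Int) (max_errors : Int) (i : Nat) : Bool :=
  if h : i < row.length then
    if row.getD (i-1) 0 > row.getD i 0 ∧ row.getD (i-1) 0 - row.getD i 0 ≤ 3 then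
      aGo row max_errors (i+1)
    else
      if max_errors > 0 then
        aGo (row.eraseIdx i) (max_errors - 1) 1 || aGo (row.eraseIdx (i-1)) (max_errors - 1) 1
      else false
  else true
termination_by (row.length, row.length - i)
decreasing_by
  · exact Prod.Lex.right _ (Nat.sub_succ_lt_self _ _ h)
  · exact Prod.Lex.left _ _ (List.length_eraseIdx_of_lt h ▸ Nat.sub_lt (Nat.zero_lt_of_lt h) Nat.one_pos)
  · exact Prod.Lex.left _ _ (List.length_eraseIdx_of_lt (Nat.lt_of_le_of_lt (Nat.sub_le i 1) h) ▸ Nat.sub_lt (Nat.zero_lt_of_lt h) Nat.one_pos)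

def is_safe_decremental (row : List Int) (max_errors : Int) : Bool :=
  aGo row max_errors 1

-- ===== PORT B =====
-- Source B's inner for-loop over zip(seq, seq[1:]) with counter i: index of the first
-- adjacent pair violating the decreasing-by-≤3 rule, walking the list itself.
def bScan : List Int → Nat → Option Nat
  | a :: b :: rest, i => if ¬ (a > b ∧ a - b ≤ 3) then some i else bScan (b :: rest) (i+1)
  | _, _ => none

-- Source B's while-loop over the work stack (head of the list = top of the stack; pushes in
-- Source B's order, so the seq-without-(violation-1) copy is popped first). The fuel
-- parameter is a totality guard only: bStack_fuel_eq_any below proves it is never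
-- exhausted from the 4^(length+1) budget is_safe_decremental_alt supplies.
def bStackF : Nat → List (List Int × Int) → Bool
  | 0, _ => false
  | _+1, [] => false
  | f+1, (seq, errors) :: rest =>
    match bScan seq 1 with
    | none => true
    | some v =>
      if errors > 0 then
        bStackF f ((seq.take (v-1) ++ seq.drop v, errors - 1) ::
                   (seq.take v ++ seq.drop (v+1), errors - 1) :: rest)
      else bStackF f rest

def is_safe_decremental_alt (row : List Int) (max_errors : Int) : Bool :=
  bStackF (4 ^ (row.length + 1)) [(row, max_errors)]

-- ===== PRECONDITION & SPEC =====
def Spec_is_safe_decremental (row : List Int) (max_errors : Int) (out : Bool) : Prop := out = is_safe_decremental_alt row max_errors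
instance (row : List Int) (max_errors : Int) (out : Bool) : Decidable (Spec_is_safe_decremental row max_errors out) := by unfold Spec_is_safe_decremental; infer_instance

-- ===== CLAIM (what is proved, stated in full; the proofs are below) =====
def Claim_equal_is_safe_decremental : Prop := ∀ (row : List Int) (max_errors : Int), Dom_is_safe_decremental row max_errors → Spec_is_safe_decremental row max_errors (is_safe_decremental row max_errors)

-- ===== LEMMAS AND PROOFS =====

-- the violation index bScan finds lies within the scanned list
theorem bScan_lt : ∀ (l : List Int) (i v : Nat), bScan l i = some v →
    i ≤ v ∧ v + 1 < i + l.length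
  | [], _, _, h => nomatch h
  | [_], _, _, h => nomatch h
  | a :: b :: r, i, v, h => by
    rw [bScan] at h
    by_cases hc : ¬ (a > b ∧ a - b ≤ 3)
    · rw [if_pos hc] at h
      injection h with h
      subst h
      refine ⟨Nat.le_refl _, ?_⟩
      rw [List.length_cons, List.length_cons]
      omega
    · rw [if_neg hc] at h
      have ih := bScan_lt (b :: r) (i+1) v h
      refine ⟨Nat.le_of_succ_le ih.1, ?_⟩
      rw [List.length_cons] at ih ⊢
      rw [List.length_cons]
      omega

theorem pvPowLem (L : Nat) (hL : 1 ≤ L) : 4 ^ (L-1) + 4 ^ (L-1) < 4 ^ L := by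
  have h4 : 4 ^ L = 4 ^ (L-1) * 4 := by rw [← pow_succ]; congr 1; omega
  have hp : 0 < 4 ^ (L-1) := Nat.pow_pos (by omega)
  omega

theorem pvLenCut (seq : List Int) (a b : Nat) (h1 : a ≤ seq.length) (h2 : b ≤ seq.length)
    (h3 : a + 1 = b) : (seq.take a ++ seq.drop b).length = seq.length - 1 := by
  rw [List.length_append, List.length_take_of_le h1, List.length_drop]
  omega

theorem bScan_short {l : List Int} (h : l.length ≤ 1) (i : Nat) : bScan l i = none := by
  match l, h with
  | [], _ => rfl
  | [a], _ => rfl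

-- A's loop at index i, characterised through B's scan of the remaining suffix.
theorem aGo_eq_scan (row : List Int) (e : Int) (i : Nat) (hi : 1 ≤ i) :
    aGo row e i =
      match bScan (row.drop (i-1)) i with
      | none => true
      | some v =>
        if e > 0 then aGo (row.eraseIdx v) (e-1) 1 || aGo (row.eraseIdx (v-1)) (e-1) 1
        else false := by
  induction hn : row.length - i using Nat.strong_induction_on generalizing i with
  | _ n ih =>
  by_cases hlt : i < row.length
  · have hd1 : row.drop (i-1) = row[i-1] :: row.drop i := by
      rw [List.drop_eq_getElem_cons (show i-1 < row.length by omega),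
          show i - 1 + 1 = i from by omega]
    have hd2 : row.drop i = row[i] :: row.drop (i+1) :=
      List.drop_eq_getElem_cons hlt
    have hg1 : row.getD (i-1) 0 = row[i-1] := List.getD_eq_getElem _ _ (by omega)
    have hg2 : row.getD i 0 = row[i] := List.getD_eq_getElem _ _ hlt
    rw [aGo, dif_pos hlt, hd1, hd2, bScan, hg1, hg2]
    by_cases hc : ¬ (row[i-1] > row[i] ∧ row[i-1] - row[i] ≤ 3)
    · rw [if_pos hc, if_neg hc]
    · rw [if_neg hc, if_pos (by tauto)]
      have := ih (row.length - (i+1)) (by omega) (i+1) (by omega) rfl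
      rw [this, ← hd2]
      have : (i+1) - 1 = i := by omega
      rw [this]
  · rw [aGo, dif_neg hlt]
    rw [bScan_short (by simp; omega) i]

-- the invariant of Source B's while-loop: with fuel above the stack's 4^length measure,
-- the loop succeeds iff some state on the stack is safe in A's sense
theorem bStackF_eq_any : ∀ (f : Nat) (st : List (List Int × Int)),
    (st.map (fun s => 4 ^ s.1.length)).sum < f →
    bStackF f st = st.any (fun s => aGo s.1 s.2 1) := by
  intro f
  induction f with
  | zero => intro st h; exact absurd h (Nat.not_lt_zero _)
  | succ f ih =>
    intro st h
    match st with
    | [] => rfl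
    | (seq, errors) :: rest =>
      rw [bStackF, List.any_cons, aGo_eq_scan seq errors 1 le_rfl]
      simp only [show (1:Nat) - 1 = 0 from rfl, List.drop_zero]
      rw [List.map_cons, List.sum_cons] at h
      dsimp only at h
      cases hs : bScan seq 1 with
      | none => simp
      | some v =>
        obtain ⟨hv1, hv2⟩ := bScan_lt seq 1 v hs
        dsimp only
        by_cases he : errors > 0
        · rw [if_pos he]
          have e1 : (seq.take (v-1) ++ seq.drop v).length = seq.length - 1 :=
            pvLenCut seq (v-1) v (by omega) (by omega) (by omega)
          have e2 : (seq.take v ++ seq.drop (v+1)).length = seq.length - 1 :=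
            pvLenCut seq v (v+1) (by omega) (by omega) rfl
          have hm : ((((seq.take (v-1) ++ seq.drop v, errors - 1) ::
                      (seq.take v ++ seq.drop (v+1), errors - 1) :: rest).map
                      (fun s => 4 ^ s.1.length)).sum) < f := by
            rw [List.map_cons, List.map_cons, List.sum_cons, List.sum_cons, e1, e2]
            have := pvPowLem seq.length (by omega)
            omega
          rw [ih _ hm]
          rw [List.any_cons, List.any_cons]
          rw [← List.eraseIdx_eq_take_drop_succ]
          have htd : seq.take (v-1) ++ seq.drop v = seq.eraseIdx (v-1) := by
            rw [List.eraseIdx_eq_take_drop_succ, show v - 1 + 1 = v from by omega]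
          rw [htd]
          cases aGo (seq.eraseIdx v) (errors-1) 1 <;>
            cases aGo (seq.eraseIdx (v-1)) (errors-1) 1 <;> simp [he]
        · rw [if_neg he]
          have hm : ((rest.map (fun s => 4 ^ s.1.length)).sum) < f := by
            have : 0 < 4 ^ seq.length := Nat.pow_pos (by omega)
            omega
          rw [ih _ hm, if_neg he]
          simp

-- ===== VERDICT (by name: the statement is the Claim_ definition above) =====
theorem is_safe_decremental_spec : Claim_equal_is_safe_decremental := by
  intro row max_errors _
  unfold Spec_is_safe_decremental is_safe_decremental is_safe_decremental_alt
  rw [bStackF_eq_any]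
  · simp
  · rw [List.map_cons, List.sum_cons, List.map_nil, List.sum_nil]
    have : (4:Nat) ^ row.length < 4 ^ (row.length + 1) :=
      Nat.pow_lt_pow_right (by omega) (Nat.lt_succ_self _)
    omega
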